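-- pv_equiv track=rewrite | github.com/verus56/ISDB-wink-ihsan-ai | Challenge3/aaoifi-enhancement-system/src/agents/standards_reviewer.py | _generate_implementation_roadmap
-- ===== SOURCE A (Python) =====
-- def _generate_implementation_roadmap(enhancements):
--     """
--     Generate an implementation roadmap for the enhancements.
--
--     Args:
--         enhancements (list): List of enhancement dictionaries
--
--     Returns:
--         str: Implementation roadmap text
--     """
--     # Group enhancements by priority
--     critical = [e for e in enhancements if e.get('priority') == 'critical']
--     high = [e for e in enhancements if e.get('priority') == 'high']
--     medium = [e for e in enhancements if e.get('priority') == 'medium']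
--     low = [e for e in enhancements if e.get('priority') == 'low']
--
--     roadmap = []
--
--     # Immediate Phase (0-3 months)
--     roadmap.append("### Immediate Phase (0-3 months)")
--     if critical:
--         roadmap.append("- Address all critical priority enhancements:")
--         for enhancement in critical:
--             roadmap.append(f"  - {enhancement.get('title')}")
--
--     roadmap.append("- Establish enhancement working groups")
--     roadmap.append("- Develop detailed project plans for high priority items")
--     roadmap.append("- Initiate stakeholder consultations")
--
--     # Short-term Phase (3-6 months)
--     roadmap.append("\n### Short-term Phase (3-6 months)")
--     if high:
--         roadmap.append("- Address high priority enhancements:")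
--         for enhancement in high[:3]:  # Show up to 3 examples
--             roadmap.append(f"  - {enhancement.get('title')}")
--         if len(high) > 3:
--             roadmap.append(f"  - Plus {len(high) - 3} additional high priority items")
--
--     roadmap.append("- Begin development of implementation support materials")
--     roadmap.append("- Conduct preliminary impact assessments")
--
--     # Medium-term Phase (6-12 months)
--     roadmap.append("\n### Medium-term Phase (6-12 months)")
--     if medium:
--         roadmap.append("- Address medium priority enhancements")
--         roadmap.append(f"  - Focus on {len(medium)} identified items")
--
--     roadmap.append("- Release updated standards documentation")
--     roadmap.append("- Conduct training and awareness sessions")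
--     roadmap.append("- Gather implementation feedback")
--
--     # Long-term Phase (12+ months)
--     roadmap.append("\n### Long-term Phase (12+ months)")
--     if low:
--         roadmap.append("- Address remaining low priority enhancements")
--         roadmap.append(f"  - Complete {len(low)} identified items")
--
--     roadmap.append("- Conduct comprehensive review of standards ecosystem")
--     roadmap.append("- Develop next-generation standards framework")
--     roadmap.append("- Establish continuous improvement mechanism")
--
--     return "\n".join(roadmap)
-- ===== SOURCE B (Python) =====
-- def _generate_implementation_roadmap(enhancements):
--     # One grouping pass over the input instead of four full scans.
--     groups = {}
--     for e in enhancements: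
--         p = e.get('priority')
--         groups[p] = groups.get(p, []) + [e]
--     critical = groups.get('critical', [])
--     high = groups.get('high', [])
--     medium = groups.get('medium', [])
--     low = groups.get('low', [])
--
--     lines = ["### Immediate Phase (0-3 months)"]
--     if critical:
--         lines += ["- Address all critical priority enhancements:"]
--         lines += ["  - {}".format(e.get('title')) for e in critical]
--     lines += [
--         "- Establish enhancement working groups",
--         "- Develop detailed project plans for high priority items",
--         "- Initiate stakeholder consultations",
--         "\n### Short-term Phase (3-6 months)",
--     ]
--     if high:
--         lines += ["- Address high priority enhancements:"]
--         lines += ["  - {}".format(e.get('title')) for e in high[:3]]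
--         if len(high) > 3:
--             lines += ["  - Plus {} additional high priority items".format(len(high) - 3)]
--     lines += [
--         "- Begin development of implementation support materials",
--         "- Conduct preliminary impact assessments",
--         "\n### Medium-term Phase (6-12 months)",
--     ]
--     if medium:
--         lines += ["- Address medium priority enhancements",
--                   "  - Focus on {} identified items".format(len(medium))]
--     lines += [
--         "- Release updated standards documentation",
--         "- Conduct training and awareness sessions",
--         "- Gather implementation feedback",
--         "\n### Long-term Phase (12+ months)",
--     ]
--     if low:
--         lines += ["- Address remaining low priority enhancements",
--                   "  - Complete {} identified items".format(len(low))]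
--     lines += [
--         "- Conduct comprehensive review of standards ecosystem",
--         "- Develop next-generation standards framework",
--         "- Establish continuous improvement mechanism",
--     ]
--     return "\n".join(lines)
-- ===== Notes on version B (the rewrite author's own statement) =====
-- stated objective: alternative
-- what changed: Replaces the four per-priority list comprehensions (four full scans) with a single grouping pass into a dict of lists, and builds the roadmap by concatenating per-phase line blocks instead of appending line by line.
import Mathlib
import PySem

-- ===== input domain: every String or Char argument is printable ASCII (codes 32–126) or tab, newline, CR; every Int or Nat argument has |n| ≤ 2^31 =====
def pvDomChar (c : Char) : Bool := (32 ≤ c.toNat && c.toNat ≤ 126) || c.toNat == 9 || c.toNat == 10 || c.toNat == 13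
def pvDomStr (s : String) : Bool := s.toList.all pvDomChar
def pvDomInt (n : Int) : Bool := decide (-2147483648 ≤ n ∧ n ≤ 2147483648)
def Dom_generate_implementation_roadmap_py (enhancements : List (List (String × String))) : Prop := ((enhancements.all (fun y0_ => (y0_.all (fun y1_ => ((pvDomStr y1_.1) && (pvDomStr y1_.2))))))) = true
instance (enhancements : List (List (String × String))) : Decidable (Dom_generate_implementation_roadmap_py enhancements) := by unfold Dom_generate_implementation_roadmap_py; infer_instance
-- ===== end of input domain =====

-- B groups by priority in one pass into a dict of lists and concatenates per-phase blocks;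
-- A filters the list once per priority and appends lines one at a time. Same output, proved equal.

-- shared helper: Python dict .get(k) on an association list (first match)
def pvLookup (d : List (String × String)) (k : String) : Option String :=
  (d.find? (fun p => p.1 == k)).map (·.2)

-- f-string rendering of e.get('title'): a missing key prints as "None"
def pvFmt (o : Option String) : String :=
  match o with
  | some s => s
  | none => "None"

-- ===== PORT A =====
def generate_implementation_roadmap_py (enhancements : List (List (String × String))) : String :=
  let critical := enhancements.filter (fun e => pvLookup e "priority" == some "critical")
  let high := enhancements.filter (fun e => pvLookup e "priority" == some "high")
  let medium := enhancements.filter (fun e => pvLookup e "priority" == some "medium")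
  let low := enhancements.filter (fun e => pvLookup e "priority" == some "low")
  let roadmap : List String := ["### Immediate Phase (0-3 months)"]
  let roadmap := if critical.isEmpty then roadmap else
    critical.foldl (fun r e => r ++ ["  - " ++ pvFmt (pvLookup e "title")])
      (roadmap ++ ["- Address all critical priority enhancements:"])
  let roadmap := roadmap ++ ["- Establish enhancement working groups"]
    ++ ["- Develop detailed project plans for high priority items"]
    ++ ["- Initiate stakeholder consultations"]
    ++ ["\n### Short-term Phase (3-6 months)"]
  let roadmap := if high.isEmpty then roadmap else
    let r := (PySem.List.slice high none (some 3)).foldl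
      (fun r e => r ++ ["  - " ++ pvFmt (pvLookup e "title")])
      (roadmap ++ ["- Address high priority enhancements:"])
    if (3 : Int) < (high.length : Int) then
      r ++ ["  - Plus " ++ PySem.Int.toStr ((high.length : Int) - 3) ++ " additional high priority items"]
    else r
  let roadmap := roadmap ++ ["- Begin development of implementation support materials"]
    ++ ["- Conduct preliminary impact assessments"]
    ++ ["\n### Medium-term Phase (6-12 months)"]
  let roadmap := if medium.isEmpty then roadmap else
    roadmap ++ ["- Address medium priority enhancements"]
      ++ ["  - Focus on " ++ PySem.Int.toStr (medium.length : Int) ++ " identified items"]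
  let roadmap := roadmap ++ ["- Release updated standards documentation"]
    ++ ["- Conduct training and awareness sessions"]
    ++ ["- Gather implementation feedback"]
    ++ ["\n### Long-term Phase (12+ months)"]
  let roadmap := if low.isEmpty then roadmap else
    roadmap ++ ["- Address remaining low priority enhancements"]
      ++ ["  - Complete " ++ PySem.Int.toStr (low.length : Int) ++ " identified items"]
  let roadmap := roadmap ++ ["- Conduct comprehensive review of standards ecosystem"]
    ++ ["- Develop next-generation standards framework"]
    ++ ["- Establish continuous improvement mechanism"]
  PySem.Str.join "\n" roadmap

-- ===== PORT B =====
def generate_implementation_roadmap_py_alt (enhancements : List (List (String × String))) : String :=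
  let groups := enhancements.foldl
    (fun d e => PySem.Dict.modify d (pvLookup e "priority") [] (· ++ [e]))
    (PySem.Dict.empty : PySem.Dict (Option String) (List (List (String × String))))
  let critical := groups.getD (some "critical") []
  let high := groups.getD (some "high") []
  let medium := groups.getD (some "medium") []
  let low := groups.getD (some "low") []
  let lines : List String := ["### Immediate Phase (0-3 months)"]
    ++ (if critical.isEmpty then [] else
          "- Address all critical priority enhancements:"
            :: critical.map (fun e => "  - " ++ pvFmt (pvLookup e "title")))
    ++ ["- Establish enhancement working groups",
        "- Develop detailed project plans for high priority items",
        "- Initiate stakeholder consultations",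
        "\n### Short-term Phase (3-6 months)"]
    ++ (if high.isEmpty then [] else
          ["- Address high priority enhancements:"]
          ++ (PySem.List.slice high none (some 3)).map (fun e => "  - " ++ pvFmt (pvLookup e "title"))
          ++ (if (3 : Int) < (high.length : Int) then
                ["  - Plus " ++ PySem.Int.toStr ((high.length : Int) - 3) ++ " additional high priority items"]
              else []))
    ++ ["- Begin development of implementation support materials",
        "- Conduct preliminary impact assessments",
        "\n### Medium-term Phase (6-12 months)"]
    ++ (if medium.isEmpty then [] else
          ["- Address medium priority enhancements",
           "  - Focus on " ++ PySem.Int.toStr (medium.length : Int) ++ " identified items"])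
    ++ ["- Release updated standards documentation",
        "- Conduct training and awareness sessions",
        "- Gather implementation feedback",
        "\n### Long-term Phase (12+ months)"]
    ++ (if low.isEmpty then [] else
          ["- Address remaining low priority enhancements",
           "  - Complete " ++ PySem.Int.toStr (low.length : Int) ++ " identified items"])
    ++ ["- Conduct comprehensive review of standards ecosystem",
        "- Develop next-generation standards framework",
        "- Establish continuous improvement mechanism"]
  PySem.Str.join "\n" lines

-- ===== PRECONDITION & SPEC =====
def Spec_generate_implementation_roadmap_py (enhancements : List (List (String × String))) (out : String) : Prop := out = generate_implementation_roadmap_py_alt enhancements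
instance (enhancements : List (List (String × String))) (out : String) : Decidable (Spec_generate_implementation_roadmap_py enhancements out) := by unfold Spec_generate_implementation_roadmap_py; infer_instance

-- ===== CLAIM (what is proved, stated in full; the proofs are below) =====
def Claim_equal_generate_implementation_roadmap_py : Prop := ∀ (enhancements : List (List (String × String))), Dom_generate_implementation_roadmap_py enhancements → Spec_generate_implementation_roadmap_py enhancements (generate_implementation_roadmap_py enhancements)

-- ===== LEMMAS AND PROOFS =====

-- B's one-pass grouping dict looked up at a priority is A's filter at that priority
lemma groups_getD (l : List (List (String × String))) (c : Option String) :
    (l.foldl (fun d e => PySem.Dict.modify d (pvLookup e "priority") [] (· ++ [e]))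
        (PySem.Dict.empty : PySem.Dict (Option String) (List (List (String × String))))).getD c []
      = l.filter (fun e => pvLookup e "priority" == c) := by
  have h := PySem.Dict.getD_foldl_modify_append
    (l := l.map (fun e => (pvLookup e "priority", e)))
    (d := (PySem.Dict.empty : PySem.Dict (Option String) (List (List (String × String))))) (c := c)
  rw [List.foldl_map] at h
  simpa [List.filter_map, Function.comp_def] using h

theorem generate_implementation_roadmap_py_spec' :
    ∀ (enhancements : List (List (String × String))),
      generate_implementation_roadmap_py enhancements
        = generate_implementation_roadmap_py_alt enhancements := by
  intro enh
  unfold generate_implementation_roadmap_py generate_implementation_roadmap_py_alt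
  simp only [groups_getD, PySem.List.foldl_append_singleton_eq_map]
  split_ifs <;> simp

-- ===== VERDICT (by name: the statement is the Claim_ definition above) =====
theorem generate_implementation_roadmap_py_spec : Claim_equal_generate_implementation_roadmap_py := by
  intro enh _
  unfold Spec_generate_implementation_roadmap_py
  exact generate_implementation_roadmap_py_spec' enh
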